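-- pv_equiv track=rewrite | github.com/eugenekingfish/lms | linear_quivers.py | remove_lists_and_zeroes
-- ===== SOURCE A (Python) =====
-- def remove_lists_and_zeroes(L):
--     idx = len(L) - 1
--     non_zero_found = False
--
--     while idx >= 0:
--         if L[idx] == []:
--             if non_zero_found:
--                 L[idx] = 0
--             else:
--                 L.pop()
--         else:
--             non_zero_found = True
--             L[idx] = L[idx][0]
--         idx -= 1
--     return L
-- ===== SOURCE B (Python) =====
-- def remove_lists_and_zeroes(L):
--     n = len(L)
--     while n > 0 and L[n - 1] == []:
--         n -= 1
--     del L[n:]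
--     for i in range(n):
--         L[i] = 0 if L[i] == [] else L[i][0]
--     return L
-- ===== Notes on version B (the rewrite author's own statement) =====
-- stated objective: simpler
-- what changed: Instead of A's single right-to-left pass that pops/overwrites while tracking a non_zero_found flag, B first finds the boundary of trailing empty lists, truncates them in one del, then transforms the remaining prefix in a plain forward pass.
import Mathlib
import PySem

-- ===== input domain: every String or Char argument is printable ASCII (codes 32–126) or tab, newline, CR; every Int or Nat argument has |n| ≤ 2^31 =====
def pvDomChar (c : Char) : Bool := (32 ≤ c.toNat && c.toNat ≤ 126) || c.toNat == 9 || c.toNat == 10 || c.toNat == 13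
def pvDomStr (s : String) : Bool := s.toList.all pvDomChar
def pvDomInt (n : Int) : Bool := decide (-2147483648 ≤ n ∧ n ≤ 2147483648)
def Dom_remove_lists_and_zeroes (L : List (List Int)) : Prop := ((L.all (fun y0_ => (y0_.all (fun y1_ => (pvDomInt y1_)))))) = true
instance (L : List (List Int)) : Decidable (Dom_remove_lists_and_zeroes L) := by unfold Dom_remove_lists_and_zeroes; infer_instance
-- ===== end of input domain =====

-- B trims trailing empty lists first, then maps the prefix; return-value equivalence only
-- (both Pythons mutate L in place and return the same object).
-- ===== PORT A =====
-- A walks idx from the end to the front with a non_zero_found flag, popping trailing [],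
-- turning other [] into 0 and unwrapping non-empty sublists; the state flowing right-to-left
-- is modelled by recursing on the tail first (the tail is processed before the head).
def pvALoop : List (List Int) → (List Int × Bool)
  | [] => ([], false)
  | x :: xs =>
    let (res, nz) := pvALoop xs
    if x = [] then
      if nz then (0 :: res, nz) else (res, nz)   -- L[idx] = 0  /  L.pop()
    else ((x.headD 0) :: res, true)              -- L[idx] = L[idx][0] (x ≠ [] here)

def remove_lists_and_zeroes (L : List (List Int)) : List Int := (pvALoop L).1

-- ===== PORT B =====
-- the right-to-left boundary scan + del L[n:]
def pvTrim (L : List (List Int)) : List (List Int) :=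
  (L.reverse.dropWhile (fun l => l = [])).reverse

def remove_lists_and_zeroes_alt (L : List (List Int)) : List Int :=
  (pvTrim L).map (fun l => if l = [] then 0 else l.headD 0)

-- ===== PRECONDITION & SPEC =====
def Spec_remove_lists_and_zeroes (L : List (List Int)) (out : List Int) : Prop := out = remove_lists_and_zeroes_alt L
instance (L : List (List Int)) (out : List Int) : Decidable (Spec_remove_lists_and_zeroes L out) := by unfold Spec_remove_lists_and_zeroes; infer_instance

-- ===== CLAIM (what is proved, stated in full; the proofs are below) =====
def Claim_equal_remove_lists_and_zeroes : Prop := ∀ (L : List (List Int)), Dom_remove_lists_and_zeroes L → Spec_remove_lists_and_zeroes L (remove_lists_and_zeroes L)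

-- ===== LEMMAS AND PROOFS =====

-- ===== VERDICT (by name: the statement is the Claim_ definition above) =====
lemma pvTrim_cons (x : List Int) (xs : List (List Int)) :
    pvTrim (x :: xs) = if x = [] ∧ pvTrim xs = [] then [] else x :: pvTrim xs := by
  have h := List.isEmpty_iff (l := xs.reverse.dropWhile (fun l => decide (l = [])))
  simp only [pvTrim, List.reverse_cons, List.dropWhile_append]
  by_cases hx : x = [] <;>
    by_cases he : (xs.reverse.dropWhile (fun l => decide (l = []))).isEmpty <;>
    (try simp_all [List.dropWhile]) <;> split_ifs <;> simp_all

lemma pvALoop_eq (L : List (List Int)) :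
    pvALoop L = ((pvTrim L).map (fun l => if l = [] then 0 else l.headD 0),
                 !(pvTrim L).isEmpty) := by
  induction L with
  | nil => simp [pvALoop, pvTrim]
  | cons x xs ih =>
    simp only [pvALoop, ih, pvTrim_cons]
    by_cases hx : x = [] <;> by_cases h : pvTrim xs = [] <;>
      simp_all

theorem remove_lists_and_zeroes_spec : Claim_equal_remove_lists_and_zeroes := by
  intro L _
  unfold Spec_remove_lists_and_zeroes remove_lists_and_zeroes remove_lists_and_zeroes_alt
  rw [pvALoop_eq]
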